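-- pv_equiv track=rewrite | github.com/elevenisrising/SubGenie | src/processing/main.py | fallback_word_mapping
-- ===== SOURCE A (Python) =====
-- from typing import Any, Dict, List, Tuple, Optional
--
-- def fallback_word_mapping(start_pos: int, end_pos: int, clean_words: List[Dict], reference_text: str) -> Tuple[int, int]:
--     """Fallback word mapping when character mapping fails."""
--
--     # Extract target text
--     if start_pos >= 0 and end_pos < len(reference_text) and end_pos >= start_pos:
--         target_text = reference_text[start_pos:end_pos + 1].strip()
--         target_words = target_text.split()
--
--
--         if target_words:
--             # Find word sequence in clean_words
--             clean_word_texts = [w["word"] for w in clean_words]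
--
--
--             # Try to find matching sequence
--             for start_idx in range(len(clean_word_texts) - len(target_words) + 1):
--                 window = clean_word_texts[start_idx:start_idx + len(target_words)]
--
--                 # Case-insensitive comparison
--                 if [w.lower() for w in target_words] == [w.lower() for w in window]:
--                     return start_idx, start_idx + len(target_words) - 1
--
--             pass  # No exact word sequence match found
--         else:
--             pass  # Target text has no words
--     else:
--         pass  # Invalid position bounds
--
--     # Last resort: return reasonable bounds
--     mid_word_idx = len(clean_words) // 2
--     return max(0, mid_word_idx - 1), min(len(clean_words) - 1, mid_word_idx + 1)
-- ===== SOURCE B (Python) =====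
-- def fallback_word_mapping(start_pos, end_pos, clean_words, reference_text):
--     """Inverted index: map each token to its list of positions once, then verify
--     the window only at the positions of the pattern's first token; the full
--     per-index scan of A disappears."""
--     n = len(clean_words)
--     if 0 <= start_pos <= end_pos < len(reference_text):
--         pat = [w.lower() for w in reference_text[start_pos:end_pos + 1].strip().split()]
--         if pat:
--             m = len(pat)
--             toks = [w["word"].lower() for w in clean_words]
--             occ = {}
--             for i, t in enumerate(toks):
--                 occ.setdefault(t, []).append(i)
--             for i in occ.get(pat[0], []):
--                 if toks[i:i + m] == pat:
--                     return i, i + m - 1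
--     mid = n // 2
--     return max(0, mid - 1), min(n - 1, mid + 1)
-- ===== Notes on version B (the rewrite author's own statement) =====
-- stated objective: alternative
-- what changed: B lowercases pattern and tokens once and builds an inverted index (dict token -> positions) in one pass, then checks the window only at the positions of the pattern's first token, instead of A's per-index sliding window that slices and re-lowercases pattern and window at every index.
import Mathlib
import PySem

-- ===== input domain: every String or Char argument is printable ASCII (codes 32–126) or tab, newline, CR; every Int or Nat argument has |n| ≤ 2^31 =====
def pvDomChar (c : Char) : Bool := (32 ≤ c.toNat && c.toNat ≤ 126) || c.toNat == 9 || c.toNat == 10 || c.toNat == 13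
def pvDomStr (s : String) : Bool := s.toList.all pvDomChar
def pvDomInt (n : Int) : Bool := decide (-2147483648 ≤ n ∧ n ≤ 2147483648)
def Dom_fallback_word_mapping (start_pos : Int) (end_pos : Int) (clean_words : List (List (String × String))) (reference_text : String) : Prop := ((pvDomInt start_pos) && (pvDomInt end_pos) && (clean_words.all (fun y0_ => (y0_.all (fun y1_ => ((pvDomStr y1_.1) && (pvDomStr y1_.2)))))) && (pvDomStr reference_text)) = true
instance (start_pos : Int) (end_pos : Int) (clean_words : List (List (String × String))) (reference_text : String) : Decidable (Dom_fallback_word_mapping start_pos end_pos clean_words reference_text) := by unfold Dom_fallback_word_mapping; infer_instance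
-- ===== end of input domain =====

-- B builds an inverted index (token -> positions) once and verifies the window only at the
-- positions of the pattern's first token, instead of A's per-index window slicing
-- (return value only; no mutation).

-- ===== PORT A =====
def fallback_word_mapping (start_pos : Int) (end_pos : Int) (clean_words : List (List (String × String))) (reference_text : String) : Int × Int :=
  let hit : Option (Int × Int) :=
    if start_pos ≥ 0 ∧ end_pos < PySem.Str.len reference_text ∧ end_pos ≥ start_pos then
      let target_text := PySem.Str.strip (PySem.Str.slice reference_text (some start_pos) (some (end_pos + 1)))
      let target_words := PySem.Str.split₀ target_text
      if target_words ≠ [] then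
        -- w["word"]: missing key raises KeyError in Python; Pre_ excludes that, default never read inside Pre_
        let clean_word_texts := clean_words.map (fun w => PySem.Dict.getD (PySem.Dict.mk w) "word" "")
        -- for start_idx in range(len(clean_word_texts) - len(target_words) + 1): first index whose window matches
        match (PySem.List.pyRange 0 ((clean_word_texts.length : Int) - (target_words.length : Int) + 1) 1).find?
            (fun start_idx =>
              let window := PySem.List.slice clean_word_texts (some start_idx) (some (start_idx + (target_words.length : Int)))
              target_words.map PySem.Str.lower == window.map PySem.Str.lower) with
        | some start_idx => some (start_idx, start_idx + (target_words.length : Int) - 1)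
        | none => none
      else none
    else none
  match hit with
  | some r => r
  | none =>
    let mid_word_idx := PySem.Int.floordiv (clean_words.length : Int) 2
    (max 0 (mid_word_idx - 1), min ((clean_words.length : Int) - 1) (mid_word_idx + 1))

-- ===== PORT B =====
def fallback_word_mapping_alt (start_pos : Int) (end_pos : Int) (clean_words : List (List (String × String))) (reference_text : String) : Int × Int :=
  let n : Int := (clean_words.length : Int)
  let hit : Option (Int × Int) :=
    if 0 ≤ start_pos ∧ start_pos ≤ end_pos ∧ end_pos < PySem.Str.len reference_text then
      let pat := (PySem.Str.split₀ (PySem.Str.strip (PySem.Str.slice reference_text (some start_pos) (some (end_pos + 1))))).map PySem.Str.lower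
      match pat with
      | [] => none
      | first :: rest =>
        let m : Int := ((first :: rest).length : Int)
        -- w["word"]: missing key raises KeyError in Python; Pre_ excludes that, default never read inside Pre_
        let toks := clean_words.map (fun w => PySem.Str.lower (PySem.Dict.getD (PySem.Dict.mk w) "word" ""))
        -- occ.setdefault(t, []).append(i): inverted index token -> positions, built in one pass
        let occ := (PySem.List.enumerate toks 0).foldl
          (fun d it => PySem.Dict.modify d it.2 [] (fun l => l ++ [it.1])) PySem.Dict.empty
        -- verify the window only at the positions of the first pattern token
        match (PySem.Dict.getD occ first []).find?
            (fun i => PySem.List.slice toks (some i) (some (i + m)) == first :: rest) with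
        | some i => some (i, i + m - 1)
        | none => none
    else none
  match hit with
  | some r => r
  | none =>
    let mid := PySem.Int.floordiv n 2
    (max 0 (mid - 1), min (n - 1) (mid + 1))

-- ===== PRECONDITION & SPEC =====
-- Pre_ excludes exactly the inputs where Python A raises KeyError: valid bounds, a non-empty
-- target word list, and some dict in clean_words lacking the key "word".
def Pre_fallback_word_mapping (start_pos : Int) (end_pos : Int) (clean_words : List (List (String × String))) (reference_text : String) : Prop :=
  (0 ≤ start_pos ∧ start_pos ≤ end_pos ∧ end_pos < PySem.Str.len reference_text ∧
      PySem.Str.split₀ (PySem.Str.strip (PySem.Str.slice reference_text (some start_pos) (some (end_pos + 1)))) ≠ []) →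
    ∀ w ∈ clean_words, (PySem.Dict.get? (PySem.Dict.mk w) "word").isSome
instance (start_pos : Int) (end_pos : Int) (clean_words : List (List (String × String))) (reference_text : String) : Decidable (Pre_fallback_word_mapping start_pos end_pos clean_words reference_text) := by unfold Pre_fallback_word_mapping; infer_instance

def pvWitness_fallback_word_mapping : Int × Int × (List (List (String × String))) × String :=
  (0, 4, [[("word", "Hello")], [("word", "world")]], "hello world")

def Spec_fallback_word_mapping (start_pos : Int) (end_pos : Int) (clean_words : List (List (String × String))) (reference_text : String) (out : Int × Int) : Prop := out = fallback_word_mapping_alt start_pos end_pos clean_words reference_text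
instance (start_pos : Int) (end_pos : Int) (clean_words : List (List (String × String))) (reference_text : String) (out : Int × Int) : Decidable (Spec_fallback_word_mapping start_pos end_pos clean_words reference_text out) := by unfold Spec_fallback_word_mapping; infer_instance

-- ===== CLAIM (what is proved, stated in full; the proofs are below) =====
def Claim_equal_fallback_word_mapping : Prop := ∀ (start_pos : Int) (end_pos : Int) (clean_words : List (List (String × String))) (reference_text : String), Dom_fallback_word_mapping start_pos end_pos clean_words reference_text → Pre_fallback_word_mapping start_pos end_pos clean_words reference_text → Spec_fallback_word_mapping start_pos end_pos clean_words reference_text (fallback_word_mapping start_pos end_pos clean_words reference_text)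

-- ===== LEMMAS AND PROOFS =====

lemma pvFindRangeExt (n : Nat) (p q : Nat → Bool) (h : ∀ j, j < n → p j = q j) :
    (List.range n).find? p = (List.range n).find? q := by
  induction n with
  | zero => rfl
  | succ n ih =>
    rw [List.range_succ, List.find?_append, List.find?_append,
      ih (fun j hj => h j (by omega))]
    simp [List.find?, h n (by omega)]

lemma pvFindRangeShrink (k : Nat) (q : Nat → Bool) :
    ∀ (n : Nat) (_hk : k ≤ n), (∀ j, k ≤ j → j < n → q j = false) →
      (List.range n).find? q = (List.range k).find? q := by
  intro n hk
  induction n, hk using Nat.le_induction with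
  | base => intro _; rfl
  | succ n hmn ih =>
    intro h
    rw [List.range_succ, List.find?_append, ih (fun j h1 h2 => h j h1 (by omega))]
    simp [List.find?, h n hmn (by omega)]

lemma pvFindFilter {α : Type} (l : List α) (p q : α → Bool) :
    (l.filter p).find? q = l.find? (fun x => p x && q x) := by
  induction l with
  | nil => rfl
  | cons a l ih =>
    by_cases hp : p a <;> by_cases hq : q a <;> simp [List.filter, List.find?, hp, hq, ih]

-- B's inverted index read back: occ.getD first [] is the in-order list of positions of 'first'
lemma pvOccSpec (toks : List String) (first : String) :
    (((PySem.List.enumerate toks 0).foldl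
        (fun d it => PySem.Dict.modify d it.2 [] (fun l => l ++ [it.1])) PySem.Dict.empty).getD first [])
      = (((PySem.List.enumerate toks 0).filter (fun it => it.2 == first)).map (fun it => it.1)) := by
  have h := PySem.Dict.getD_foldl_modify_append
    ((PySem.List.enumerate toks 0).map (fun it => (it.2, it.1))) (PySem.Dict.empty) first
  rw [List.foldl_map] at h
  simpa [List.filter_map, Function.comp] using h

-- the heart: A's indexed window scan equals B's candidate-position scan (first hit, as an index)
lemma pvFindShift (texts : List String) (first : String) (rest : List String) :
    ((PySem.List.pyRange 0 ((texts.length : Int) - (((first :: rest).length : Nat) : Int) + 1) 1).find?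
        (fun i => first :: rest ==
          (PySem.List.slice texts (some i) (some (i + (((first :: rest).length : Nat) : Int)))).map PySem.Str.lower))
      = ((PySem.List.enumerate (texts.map PySem.Str.lower) 0).find?
          (fun it => it.2 == first &&
            PySem.List.slice (texts.map PySem.Str.lower) (some it.1)
              (some (it.1 + (((first :: rest).length : Nat) : Int))) == first :: rest)).map (fun it => it.1) := by
  have hNt : (texts.map PySem.Str.lower).length = texts.length := by simp
  have hM : (first :: rest).length = rest.length + 1 := rfl
  set q : Nat → Bool := fun j =>
    decide (List.take (first :: rest).length (List.drop j (texts.map PySem.Str.lower)) = first :: rest) with hq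
  rw [PySem.List.enumerate_eq_map_pyRange (texts.map PySem.Str.lower) "", PySem.List.len_eq, hNt,
    PySem.List.pyRange_zero_natCast, List.map_map, List.find?_map, Option.map_map]
  have hqB : ∀ j, j < texts.length →
      ((fun it => it.2 == first &&
          PySem.List.slice (texts.map PySem.Str.lower) (some it.1)
            (some (it.1 + (((first :: rest).length : Nat) : Int))) == first :: rest) ∘
        (fun j => ((j : Int), PySem.List.pyGetD (texts.map PySem.Str.lower) (j : Int) "")) ∘ (fun k : Nat => k)) j = q j := by
    intro j hj
    have hj' : j < (texts.map PySem.Str.lower).length := by omega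
    simp only [Function.comp, PySem.List.slice_natCast_add,
      PySem.List.pyGetD_natCast, List.getD_eq_getElem _ _ hj', hq]
    rw [List.drop_eq_getElem_cons hj', List.length_cons, List.take_succ_cons]
    simp only [List.cons_eq_cons, Bool.decide_and]
    rw [Bool.eq_iff_iff]
    simp
  rw [pvFindRangeExt texts.length _ q hqB]
  rcases Nat.lt_or_ge texts.length (first :: rest).length with hNM | hMN
  · rw [PySem.List.pyRange_one_eq_nil (by simp only [hM] at hNM ⊢; push_cast; omega)]
    have : (List.range texts.length).find? q = none := by
      apply List.find?_eq_none.mpr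
      intro j hj
      simp only [hq, decide_eq_true_eq]
      intro h
      have := congrArg List.length h
      simp [List.length_take, List.length_drop, hNt] at this
      have hjlt := List.mem_range.mp hj
      simp only [hM] at this hNM
      omega
    rw [this]
    rfl
  · have hK : (texts.length : Int) - (((first :: rest).length : Nat) : Int) + 1
        = ((texts.length - (first :: rest).length + 1 : Nat) : Int) := by
      simp only [hM] at hMN ⊢; push_cast [Nat.cast_sub hMN]; ring
    rw [hK, PySem.List.pyRange_zero_natCast, List.find?_map]
    have hqA : ∀ j, j < texts.length - (first :: rest).length + 1 →
        ((fun i => first :: rest ==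
            (PySem.List.slice texts (some i) (some (i + (((first :: rest).length : Nat) : Int)))).map PySem.Str.lower) ∘
          (fun k : Nat => ((k : Int)))) j = q j := by
      intro j _
      simp only [Function.comp, PySem.List.slice_natCast_add, hq, List.map_take, List.map_drop]
      rw [Bool.eq_iff_iff]
      simp only [beq_iff_eq, decide_eq_true_eq]
      exact eq_comm
    rw [pvFindRangeShrink (texts.length - (first :: rest).length + 1) q texts.length (by omega)
        (by
          intro j h1 h2
          simp only [hq, decide_eq_false_iff_not]
          intro h
          have := congrArg List.length h
          rw [List.length_take, List.length_drop, hNt] at this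
          simp only [hM] at this h1
          omega),
      ← pvFindRangeExt _ _ q hqA]
    rfl

-- A's loop equals B's index lookup, stated on the two programs' own terms
lemma pvMatch (texts : List String) (first : String) (rest : List String) :
    ((PySem.List.pyRange 0 ((texts.length : Int) - (((first :: rest).length : Nat) : Int) + 1) 1).find?
        (fun i => first :: rest ==
          (PySem.List.slice texts (some i) (some (i + (((first :: rest).length : Nat) : Int)))).map PySem.Str.lower))
      = ((((PySem.List.enumerate (texts.map PySem.Str.lower) 0).foldl
            (fun d it => PySem.Dict.modify d it.2 [] (fun l => l ++ [it.1])) PySem.Dict.empty).getD first []).find?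
          (fun i => PySem.List.slice (texts.map PySem.Str.lower) (some i)
              (some (i + (((first :: rest).length : Nat) : Int))) == first :: rest)) := by
  rw [pvOccSpec, List.find?_map, pvFindFilter]
  simp only [Function.comp]
  exact pvFindShift texts first rest

-- ===== VERDICT (by name: the statement is the Claim_ definition above) =====
theorem fallback_word_mapping_spec : Claim_equal_fallback_word_mapping := by
  intro sp ep cw rt _ _
  unfold Spec_fallback_word_mapping fallback_word_mapping fallback_word_mapping_alt
  by_cases hc : 0 ≤ sp ∧ sp ≤ ep ∧ ep < PySem.Str.len rt
  · rw [if_pos (show sp ≥ 0 ∧ ep < PySem.Str.len rt ∧ ep ≥ sp from ⟨hc.1, hc.2.2, hc.2.1⟩),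
      if_pos hc]
    by_cases hw : PySem.Str.split₀ (PySem.Str.strip (PySem.Str.slice rt (some sp) (some (ep + 1)))) = []
    · simp [hw]
    · rw [if_pos hw]
      cases hp : (PySem.Str.split₀ (PySem.Str.strip (PySem.Str.slice rt (some sp) (some (ep + 1))))).map PySem.Str.lower with
      | nil => exact absurd (List.map_eq_nil_iff.mp hp) hw
      | cons first rest =>
        have hlen : (PySem.Str.split₀ (PySem.Str.strip (PySem.Str.slice rt (some sp) (some (ep + 1))))).length = (first :: rest).length := by
          rw [← hp, List.length_map]
        have hmap : (List.map (fun w => PySem.Str.lower (PySem.Dict.getD (PySem.Dict.mk w) "word" "")) cw)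
            = (List.map (fun w => PySem.Dict.getD (PySem.Dict.mk w) "word" "") cw).map PySem.Str.lower := by
          rw [List.map_map]; rfl
        rw [hmap, hlen]
        simp only [pvMatch]
  · rw [if_neg (fun h => hc ⟨h.1, h.2.2, h.2.1⟩), if_neg hc]
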